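-- pv_equiv track=rewrite | github.com/arjunbhasin2013/LeetCode-DSA | InterviewBit-Scaler/special_integer.py | solve
-- ===== SOURCE A (Python) =====
-- def solve(A, B):
--     lo, hi = 1, len(A)
--     n = len(A)
--     ans = 0
--     while lo <= hi:
--         mid = (lo + hi) // 2
--         s = sum(A[:mid])
--         if s > B:
--             hi = mid - 1
--             continue
--         for i in range(mid, n):
--             s += A[i] - A[i - mid]
--             if s > B:
--                 hi = mid - 1
--                 break
--         else:
--             lo = mid + 1
--             ans = mid
--     return ans
-- ===== SOURCE B (Python) =====
-- def solve(A, B):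
--     n = len(A)
--     P = [0]
--     for x in A:
--         P.append(P[-1] + x)
--
--     def ok(m):
--         return all(P[i + m] - P[i] <= B for i in range(n - m + 1))
--
--     def go(lo, hi, ans):
--         if lo > hi:
--             return ans
--         mid = (lo + hi) // 2
--         if ok(mid):
--             return go(mid + 1, hi, mid)
--         return go(lo, mid - 1, ans)
--
--     return go(1, n, 0)
-- ===== Notes on version B (the rewrite author's own statement) =====
-- stated objective: alternative
-- what changed: B precomputes one prefix-sum array and checks each candidate length with a single all() over prefix differences, replacing A's per-length slice re-summation and stateful sliding-update loop with break/else; the while loop becomes a recursive binary search.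
import Mathlib
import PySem

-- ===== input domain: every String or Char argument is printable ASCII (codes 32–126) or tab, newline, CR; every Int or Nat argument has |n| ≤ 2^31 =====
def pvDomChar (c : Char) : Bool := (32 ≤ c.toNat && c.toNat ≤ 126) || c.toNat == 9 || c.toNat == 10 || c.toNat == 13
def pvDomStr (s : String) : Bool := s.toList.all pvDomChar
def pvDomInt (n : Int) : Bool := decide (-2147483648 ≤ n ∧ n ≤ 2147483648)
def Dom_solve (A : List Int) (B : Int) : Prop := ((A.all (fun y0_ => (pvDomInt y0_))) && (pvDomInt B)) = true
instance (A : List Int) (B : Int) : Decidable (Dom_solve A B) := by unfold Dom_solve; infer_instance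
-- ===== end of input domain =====

-- B is an alternative implementation: one precomputed prefix-sum array + an all() check per
-- candidate length and a recursive binary search, instead of A's slice re-summation and
-- stateful sliding-window loop with break/else inside a while loop.

-- ===== PORT A =====
-- inner `for i in range(mid, n)` loop: returns false on `break` (s > B), true on the `else` path.
-- A's indices i and i-mid are always in range here, so pyGetD is exact for A[i] / A[i-mid].
def solveInner (A : List Int) (B mid : Int) : Int → List Int → Bool
  | _, [] => true
  | s, i :: rest =>
    let s' := s + PySem.List.pyGetD A i 0 - PySem.List.pyGetD A (i - mid) 0
    if s' > B then false else solveInner A B mid s' rest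

-- the `while lo <= hi` loop with state (lo, hi, ans)
def solveLoop (A : List Int) (B n lo hi ans : Int) : Int :=
  if hlh : lo ≤ hi then
    let mid := PySem.Int.floordiv (lo + hi) 2
    let s := (PySem.List.slice A none (some mid)).sum
    if s > B then solveLoop A B n lo (mid - 1) ans
    else if solveInner A B mid s (PySem.List.pyRange mid n) then solveLoop A B n (mid + 1) hi mid
    else solveLoop A B n lo (mid - 1) ans
  else ans
termination_by (hi + 1 - lo).toNat
decreasing_by
  all_goals
    (have h := PySem.Int.floordiv_two_mid_bounds hlh; omega)

def solve (A : List Int) (B : Int) : Int := solveLoop A B (A.length : Int) 1 (A.length : Int) 0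

-- ===== PORT B =====
-- P[-1] via pyGetD is exact: P is never empty.
def altPrefix (A : List Int) : List Int :=
  A.foldl (fun P x => P ++ [PySem.List.pyGetD P (-1) 0 + x]) [0]

-- ok(m): all prefix-difference windows of length m are ≤ B; indices i, i+m are in range.
def altOk (P : List Int) (B n m : Int) : Bool :=
  (PySem.List.pyRange 0 (n - m + 1)).all
    (fun i => decide (PySem.List.pyGetD P (i + m) 0 - PySem.List.pyGetD P i 0 ≤ B))

def altGo (P : List Int) (B n lo hi ans : Int) : Int :=
  if hlh : lo > hi then ans
  else
    let mid := PySem.Int.floordiv (lo + hi) 2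
    if altOk P B n mid then altGo P B n (mid + 1) hi mid
    else altGo P B n lo (mid - 1) ans
termination_by (hi + 1 - lo).toNat
decreasing_by
  all_goals
    (have h := PySem.Int.floordiv_two_mid_bounds (by omega : lo ≤ hi); omega)

def solve_alt (A : List Int) (B : Int) : Int :=
  altGo (altPrefix A) B (A.length : Int) 1 (A.length : Int) 0

-- ===== PRECONDITION & SPEC =====
def Spec_solve (A : List Int) (B : Int) (out : Int) : Prop := out = solve_alt A B
instance (A : List Int) (B : Int) (out : Int) : Decidable (Spec_solve A B out) := by unfold Spec_solve; infer_instance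

-- ===== CLAIM (what is proved, stated in full; the proofs are below) =====
def Claim_equal_solve : Prop := ∀ (A : List Int) (B : Int), Dom_solve A B → Spec_solve A B (solve A B)

-- ===== LEMMAS AND PROOFS =====

-- prefix sum of the first k elements
def pre (A : List Int) (k : Nat) : Int := (A.take k).sum

theorem pre_succ (A : List Int) (k : Nat) (hk : k < A.length) :
    pre A (k + 1) = pre A k + A.getD k 0 := by
  unfold pre
  rw [List.sum_take_succ _ _ hk]
  simp [List.getD, List.getElem?_eq_getElem hk]

-- the list of running sums produced by B's prefix loop after the initial [0]
def pscan : List Int → Int → List Int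
  | [], _ => []
  | x :: xs, s => (s + x) :: pscan xs (s + x)

theorem pyGetD_append_singleton_neg_one (Q : List Int) (s : Int) :
    PySem.List.pyGetD (Q ++ [s]) (-1) 0 = s := by
  simp [PySem.List.pyGetD, PySem.List.pyGet?, PySem.List.pyIdx?]

theorem foldl_altPrefix (xs : List Int) : ∀ (Q : List Int) (s : Int),
    List.foldl (fun P x => P ++ [PySem.List.pyGetD P (-1) 0 + x]) (Q ++ [s]) xs
      = Q ++ s :: pscan xs s := by
  induction xs with
  | nil => intro Q s; simp [pscan]
  | cons x xs ih =>
    intro Q s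
    simp only [List.foldl_cons, pyGetD_append_singleton_neg_one, pscan]
    have h := ih (Q ++ [s]) (s + x)
    rw [List.append_assoc] at h
    simpa using h

theorem altPrefix_eq (A : List Int) : altPrefix A = 0 :: pscan A 0 := by
  have h := foldl_altPrefix A [] 0
  simpa [altPrefix] using h

theorem pscan_getD (A : List Int) : ∀ (s : Int) (k : Nat), k ≤ A.length →
    (s :: pscan A s).getD k 0 = s + (A.take k).sum := by
  induction A with
  | nil =>
    intro s k hk
    have hk0 : k = 0 := by simpa using hk
    subst hk0
    simp
  | cons x xs ih =>
    intro s k hk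
    cases k with
    | zero => simp
    | succ k =>
      have h := ih (s + x) k (by simpa using hk)
      simp only [pscan, List.getD_cons_succ] at h ⊢
      rw [h, List.take_succ_cons, List.sum_cons]
      ring

theorem altPrefix_getD (A : List Int) (k : Nat) (hk : k ≤ A.length) :
    (altPrefix A).getD k 0 = pre A k := by
  rw [altPrefix_eq]
  simpa [pre] using pscan_getD A 0 k hk

-- sliding-window identity
theorem slide (A : List Int) (m j : Nat) (h : j + m < A.length) :
    pre A (j + m) - pre A j + A.getD (j + m) 0 - A.getD j 0
      = pre A (j + 1 + m) - pre A (j + 1) := by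
  have h1 : pre A (j + m + 1) = pre A (j + m) + A.getD (j + m) 0 := pre_succ A (j + m) h
  have h2 : pre A (j + 1) = pre A j + A.getD j 0 := pre_succ A j (by omega)
  have : j + 1 + m = j + m + 1 := by omega
  rw [this, h1, h2]
  ring

theorem pyRange_nil (a b : Int) (h : b ≤ a) : PySem.List.pyRange a b = [] := by
  simp [PySem.List.pyRange]
  omega

-- A's inner loop, started at window j, checks all remaining windows
theorem solveInner_spec (A : List Int) (B : Int) (m : Nat) (_hm : 1 ≤ m) :
    ∀ j : Nat, j + m ≤ A.length →
    solveInner A B (m : Int) (pre A (j + m) - pre A j)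
        (PySem.List.pyRange ((j + m : Nat) : Int) ((A.length : Nat) : Int))
      = (List.range' (j + 1) (A.length - m - j)).all
          (fun t => decide (pre A (t + m) - pre A t ≤ B)) := by
  have H : ∀ fuel : Nat, ∀ j : Nat, A.length - (j + m) = fuel → j + m ≤ A.length →
      solveInner A B (m : Int) (pre A (j + m) - pre A j)
          (PySem.List.pyRange ((j + m : Nat) : Int) ((A.length : Nat) : Int))
        = (List.range' (j + 1) (A.length - m - j)).all
            (fun t => decide (pre A (t + m) - pre A t ≤ B)) := by
    intro fuel
    induction fuel with
    | zero =>
      intro j hf hj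
      have he : j + m = A.length := by omega
      have h0 : A.length - m - j = 0 := by omega
      rw [pyRange_nil _ _ (by exact_mod_cast Nat.le_of_eq he.symm), h0]
      simp [solveInner]
    | succ fuel ih =>
      intro j hf hj
      have hlt : j + m < A.length := by omega
      rw [PySem.List.pyRange_one_cons (by exact_mod_cast hlt)]
      have hidx : ((j + m : Nat) : Int) - (m : Int) = ((j : Nat) : Int) := by push_cast; ring
      simp only [solveInner, hidx, PySem.List.pyGetD_natCast]
      have hs : pre A (j + m) - pre A j + A.getD (j + m) 0 - A.getD j 0
          = pre A (j + 1 + m) - pre A (j + 1) := slide A m j hlt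
      have hr : A.length - m - j = (A.length - m - (j + 1)) + 1 := by omega
      rw [hr, List.range'_succ, List.all_cons]
      by_cases hgt : pre A (j + 1 + m) - pre A (j + 1) > B
      · rw [if_pos (by rw [hs]; exact hgt)]
        simp [not_le.mpr hgt]
      · rw [if_neg (by rw [hs]; exact hgt)]
        have hcast : ((j + m : Nat) : Int) + 1 = ((j + 1 + m : Nat) : Int) := by push_cast; ring
        have := ih (j + 1) (by omega) (by omega)
        rw [hs, hcast, this]
        simp [not_lt.mp hgt]
  intro j hj
  exact H (A.length - (j + m)) j rfl hj

-- both per-length checks equal the same "all windows ≤ B" boolean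
theorem checkA_eq (A : List Int) (B : Int) (m : Nat) (hm : 1 ≤ m) (hn : m ≤ A.length) :
    (if (PySem.List.slice A none (some (m : Int))).sum > B then false
     else solveInner A B (m : Int) (PySem.List.slice A none (some (m : Int))).sum
            (PySem.List.pyRange (m : Int) (A.length : Int)))
      = (List.range' 0 (A.length - m + 1)).all
          (fun t => decide (pre A (t + m) - pre A t ≤ B)) := by
  have hs : (PySem.List.slice A none (some (m : Int))).sum = pre A m := by
    rw [PySem.List.slice_to A (by positivity)]
    simp [pre]
  have h0 : pre A 0 = 0 := by simp [pre]
  have hr : A.length - m + 1 = (A.length - m) + 1 := rfl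
  rw [hr, List.range'_succ, List.all_cons, hs]
  by_cases hgt : pre A m > B
  · rw [if_pos hgt]
    have hd : decide (pre A (0 + m) - pre A 0 ≤ B) = false := by
      simp only [h0, Nat.zero_add, sub_zero]
      exact decide_eq_false (by omega)
    rw [hd, Bool.false_and]
  · rw [if_neg hgt]
    have hin := solveInner_spec A B m hm 0 (by omega)
    simp only [h0, Nat.zero_add, sub_zero, Nat.sub_zero] at hin
    have hd : decide (pre A (0 + m) - pre A 0 ≤ B) = true := by
      simp only [h0, Nat.zero_add, sub_zero]
      exact decide_eq_true (by omega)
    rw [hd, Bool.true_and, hin]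

theorem all_congr_mem {α : Type} {l : List α} {p q : α → Bool}
    (h : ∀ a ∈ l, p a = q a) : l.all p = l.all q := by
  induction l with
  | nil => rfl
  | cons a l ih => simp_all [List.all_cons]

theorem altOk_eq (A : List Int) (B : Int) (m : Nat) (hm : 1 ≤ m) (hn : m ≤ A.length) :
    altOk (altPrefix A) B (A.length : Int) (m : Int)
      = (List.range' 0 (A.length - m + 1)).all
          (fun t => decide (pre A (t + m) - pre A t ≤ B)) := by
  unfold altOk
  have hcast : ((A.length : Nat) : Int) - (m : Int) + 1 = ((A.length - m + 1 : Nat) : Int) := by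
    push_cast [hn]; ring
  rw [hcast, PySem.List.pyRange_zero_natCast, List.all_map]
  rw [← List.range_eq_range']
  apply all_congr_mem
  intro t ht
  have htle : t ≤ A.length - m := by
    have := List.mem_range.mp ht
    omega
  have h1 : ((t : Nat) : Int) + (m : Int) = ((t + m : Nat) : Int) := by push_cast; ring
  simp only [Function.comp, h1, PySem.List.pyGetD_natCast]
  rw [altPrefix_getD A (t + m) (by omega), altPrefix_getD A t (by omega)]

theorem loop_eq (A : List Int) (B : Int) :
    ∀ k : Nat, ∀ lo hi ans : Int, (hi + 1 - lo).toNat = k → 1 ≤ lo → hi ≤ (A.length : Int) →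
    solveLoop A B (A.length : Int) lo hi ans = altGo (altPrefix A) B (A.length : Int) lo hi ans := by
  intro k
  induction k using Nat.strong_induction_on with
  | _ k ih =>
    intro lo hi ans hk hlo hhi
    rw [solveLoop, altGo]
    by_cases h : lo ≤ hi
    · simp only [dif_pos h, dif_neg (not_lt.mpr h)]
      have hb := PySem.Int.floordiv_two_mid_bounds h
      obtain ⟨m, hm⟩ : ∃ m : Nat, PySem.Int.floordiv (lo + hi) 2 = (m : Int) :=
        ⟨(PySem.Int.floordiv (lo + hi) 2).toNat, by omega⟩
      rw [hm] at hb ⊢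
      have hm1 : 1 ≤ m := by omega
      have hmn : m ≤ A.length := by omega
      have hCA := checkA_eq A B m hm1 hmn
      have hOK := altOk_eq A B m hm1 hmn
      by_cases hs : (PySem.List.slice A none (some (m : Int))).sum > B
      · rw [if_pos hs] at hCA ⊢
        have hok : altOk (altPrefix A) B (A.length : Int) (m : Int) = false := by
          rw [hOK, ← hCA]
        rw [if_neg (by simp [hok])]
        exact ih ((m : Int) - 1 + 1 - lo).toNat (by omega) lo ((m : Int) - 1) ans rfl hlo (by omega)
      · rw [if_neg hs] at hCA
        by_cases hin : solveInner A B (m : Int) (PySem.List.slice A none (some (m : Int))).sum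
            (PySem.List.pyRange (m : Int) (A.length : Int)) = true
        · have hok : altOk (altPrefix A) B (A.length : Int) (m : Int) = true := by
            rw [hOK, ← hCA]; exact hin
          rw [if_neg hs, if_pos hin, if_pos hok]
          exact ih (hi + 1 - ((m : Int) + 1)).toNat (by omega) ((m : Int) + 1) hi (m : Int) rfl
            (by omega) hhi
        · have hok : altOk (altPrefix A) B (A.length : Int) (m : Int) = false := by
            rw [hOK, ← hCA]; simpa using hin
          rw [if_neg hs, if_neg hin, if_neg (by simp [hok])]
          exact ih ((m : Int) - 1 + 1 - lo).toNat (by omega) lo ((m : Int) - 1) ans rfl hlo (by omega)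
    · rw [dif_neg h, dif_pos (not_le.mp h)]

-- ===== VERDICT (by name: the statement is the Claim_ definition above) =====
theorem solve_spec : Claim_equal_solve := by
  intro A B _
  unfold Spec_solve solve solve_alt
  exact loop_eq A B ((A.length : Int) + 1 - 1).toNat 1 (A.length : Int) 0 rfl le_rfl le_rfl
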